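-- pv_equiv track=rewrite | github.com/MJaroslav/VKRINE | vkrine/utils.py | element_in_dot_star_list
-- ===== SOURCE A (Python) =====
-- def element_in_dot_star_list(src, check):
--     data = ["*", check]
--     split = check.split(".")
--     i = len(split) - 1
--     while i > 0:
--         sub_split = split[:i]
--         sub_split.append("*")
--         data.append(".".join(sub_split))
--         i -= 1
--     for element in data:
--         if element in src:
--             return True
-- ===== SOURCE B (Python) =====
-- def element_in_dot_star_list(src, check):
--     for s in src:
--         if s == "*" or s == check or (s.endswith(".*") and check.startswith(s[:-2] + ".")):
--             return True
-- ===== Notes on version B (the rewrite author's own statement) =====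
-- stated objective: simpler
-- what changed: B never generates A's candidate-pattern list at all: it makes a single pass over src and matches each element directly against check (equality, the bare '*', or endswith('.*') plus a startswith prefix test), replacing A's build-patterns-then-scan-src structure with a per-element matcher.
import Mathlib
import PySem

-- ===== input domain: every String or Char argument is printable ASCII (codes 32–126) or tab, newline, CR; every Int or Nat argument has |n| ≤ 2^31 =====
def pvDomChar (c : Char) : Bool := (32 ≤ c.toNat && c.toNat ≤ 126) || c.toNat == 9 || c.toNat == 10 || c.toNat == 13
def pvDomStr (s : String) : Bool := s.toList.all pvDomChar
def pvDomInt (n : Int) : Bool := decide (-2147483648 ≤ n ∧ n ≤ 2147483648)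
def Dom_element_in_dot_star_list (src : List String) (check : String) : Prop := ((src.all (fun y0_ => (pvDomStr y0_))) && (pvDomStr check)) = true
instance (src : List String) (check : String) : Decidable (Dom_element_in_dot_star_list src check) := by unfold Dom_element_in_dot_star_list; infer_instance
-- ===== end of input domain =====

-- B drops A's generate-candidate-patterns-then-scan-src structure for a single pass over src
-- that matches each element directly against check (objective: simpler).

-- ===== PORT A =====
-- the while loop: i counts down from len(split)-1 to 1, appending ".".join(split[:i] + ["*"])
def pvALoop (split : List String) : Nat → List String
  | 0 => []
  | k + 1 =>
      (PySem.Str.join "." (PySem.List.slice split none (some ((k + 1 : Nat) : Int)) ++ ["*"]))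
        :: pvALoop split k

-- the for loop: return True on the first element found in src, fall through to None
def pvAFor (src : List String) : List String → Option Bool
  | [] => none
  | e :: rest => if src.contains e then some true else pvAFor src rest

def element_in_dot_star_list (src : List String) (check : String) : Option Bool :=
  let split := (PySem.Str.split? check ".").getD []   -- separator "." ≠ "", so split? never returns none
  let data := ["*", check] ++ pvALoop split (split.length - 1)
  pvAFor src data

-- ===== PORT B =====
-- does this one element of src match check? (Source B's if-condition)
def pvMatch (check s : String) : Bool :=
  s == "*" || s == check ||
    (PySem.Str.endswith s ".*" &&
      PySem.Str.startswith check (PySem.Str.slice s none (some (-2)) ++ "."))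

-- Source B's for loop over src: return True on the first matching element, fall through to None
def pvBScan (check : String) : List String → Option Bool
  | [] => none
  | s :: rest => if pvMatch check s then some true else pvBScan check rest

def element_in_dot_star_list_alt (src : List String) (check : String) : Option Bool :=
  pvBScan check src

-- ===== PRECONDITION & SPEC =====
def Spec_element_in_dot_star_list (src : List String) (check : String) (out : Option Bool) : Prop := out = element_in_dot_star_list_alt src check
instance (src : List String) (check : String) (out : Option Bool) : Decidable (Spec_element_in_dot_star_list src check out) := by unfold Spec_element_in_dot_star_list; infer_instance

-- ===== CLAIM (what is proved, stated in full; the proofs are below) =====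
def Claim_equal_element_in_dot_star_list : Prop := ∀ (src : List String) (check : String), Dom_element_in_dot_star_list src check → Spec_element_in_dot_star_list src check (element_in_dot_star_list src check)

-- ===== LEMMAS AND PROOFS =====

-- structural split of a char list on '.' (Python-equal to splitOn, proved below)
def pvSplitC : List Char → List (List Char)
  | [] => [[]]
  | c :: rest =>
      if c = '.' then [] :: pvSplitC rest
      else
        match pvSplitC rest with
        | [] => [[c]]          -- unreachable: pvSplitC is never []
        | p :: ps => (c :: p) :: ps

lemma pvSplitC_ne_nil (cs : List Char) : pvSplitC cs ≠ [] := by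
  cases cs with
  | nil => simp [pvSplitC]
  | cons c rest =>
      simp only [pvSplitC]
      split_ifs
      · simp
      · cases pvSplitC rest <;> simp

lemma pvGo_spec : ∀ (l : List Char) (fuel : Nat) (cur : List Char) (acc : List (List Char)),
    l.length < fuel →
    PySem.Chars.splitOn.go ['.'] fuel l cur acc
      = acc.reverse ++
        (match pvSplitC l with
         | [] => []
         | p :: ps => (cur.reverse ++ p) :: ps) := by
  intro l
  induction l with
  | nil =>
      intro fuel cur acc h
      match fuel, h with
      | fuel + 1, _ => simp [PySem.Chars.splitOn.go, pvSplitC]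
  | cons c rest ih =>
      intro fuel cur acc h
      match fuel, h with
      | fuel + 1, h =>
        have hf : rest.length < fuel := by simpa using h
        by_cases hc : c = '.'
        · subst hc
          rw [show PySem.Chars.splitOn.go ['.'] (fuel + 1) ('.' :: rest) cur acc
                = PySem.Chars.splitOn.go ['.'] fuel rest [] (cur.reverse :: acc) by
              simp [PySem.Chars.splitOn.go, List.isPrefixOf]]
          rw [ih fuel [] (cur.reverse :: acc) hf]
          have := pvSplitC_ne_nil rest
          cases hs : pvSplitC rest with
          | nil => exact absurd hs this
          | cons p ps => simp [pvSplitC, hs]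
        · rw [show PySem.Chars.splitOn.go ['.'] (fuel + 1) (c :: rest) cur acc
                = PySem.Chars.splitOn.go ['.'] fuel rest (c :: cur) acc by
              simp [PySem.Chars.splitOn.go, List.isPrefixOf, Ne.symm hc]]
          rw [ih fuel (c :: cur) acc hf]
          have := pvSplitC_ne_nil rest
          cases hs : pvSplitC rest with
          | nil => exact absurd hs this
          | cons p ps => simp [pvSplitC, hs, hc]

lemma pvSplitOn_eq (cs : List Char) : PySem.Chars.splitOn cs ['.'] = pvSplitC cs := by
  rw [PySem.Chars.splitOn, pvGo_spec cs (cs.length + 1) [] [] (by omega)]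
  have := pvSplitC_ne_nil cs
  cases hs : pvSplitC cs with
  | nil => exact absurd hs this
  | cons p ps => simp

lemma pvSplit?_eq (check : String) :
    (PySem.Str.split? check ".").getD [] = (pvSplitC check.toList).map String.ofList := by
  simp [PySem.Str.split?, PySem.Chars.split?, pvSplitOn_eq]

-- the proper dotted prefixes of cs: exactly the t with t ++ "." a prefix of cs
def pvPj : List Char → List (List Char)
  | [] => []
  | c :: rest =>
      if c = '.' then [] :: (pvPj rest).map (List.cons '.')
      else (pvPj rest).map (List.cons c)

lemma pvPj_mem (cs : List Char) (t : List Char) : t ∈ pvPj cs ↔ t ++ ['.'] <+: cs := by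
  induction cs generalizing t with
  | nil =>
      simp [pvPj, List.prefix_nil]
  | cons c rest ih =>
      simp only [pvPj]
      by_cases hc : c = '.'
      · subst hc
        cases t with
        | nil => simp
        | cons a t' =>
            simp [List.cons_prefix_cons, ih]
            tauto
      · cases t with
        | nil => simp [hc, List.cons_prefix_cons, Ne.symm hc]
        | cons a t' =>
            simp [hc, List.cons_prefix_cons, ih]
            tauto

lemma pvJoin_cons_of_ne_nil (a : List Char) (l : List (List Char)) (h : l ≠ []) :
    PySem.Chars.join ['.'] (a :: l) = a ++ ['.'] ++ PySem.Chars.join ['.'] l := by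
  cases l with
  | nil => exact absurd rfl h
  | cons b l' => exact PySem.Chars.join_cons_cons ['.'] a b l'

lemma pvPj_eq (cs : List Char) :
    pvPj cs = (List.range ((pvSplitC cs).length - 1)).map
      (fun j => PySem.Chars.join ['.'] ((pvSplitC cs).take (j + 1))) := by
  induction cs with
  | nil => simp [pvPj, pvSplitC]
  | cons c rest ih =>
      have hne := pvSplitC_ne_nil rest
      by_cases hc : c = '.'
      · subst hc
        rw [show pvPj ('.' :: rest) = [] :: (pvPj rest).map (List.cons '.') from by
              simp [pvPj],
            show pvSplitC ('.' :: rest) = [] :: pvSplitC rest from by simp [pvSplitC]]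
        have hk : (pvSplitC rest).length - 1 + 1 = (pvSplitC rest).length := by
          cases h : pvSplitC rest with
          | nil => exact absurd h hne
          | cons p ps => simp
        rw [List.length_cons, Nat.add_sub_cancel, ← hk, List.range_succ_eq_map]
        simp only [List.map_cons, List.map_map, List.take_succ_cons, List.take_zero,
          PySem.Chars.join_singleton]
        refine congrArg₂ _ rfl ?_
        rw [ih]
        rw [List.map_map]
        refine List.map_congr_left ?_
        intro j hj
        have htne : (pvSplitC rest).take (j + 1) ≠ [] := by
          cases h : pvSplitC rest with
          | nil => exact absurd h hne
          | cons p ps => simp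
        simp only [Function.comp, Nat.succ_eq_add_one]
        rw [pvJoin_cons_of_ne_nil [] _ htne]
        simp
      · cases h : pvSplitC rest with
        | nil => exact absurd h hne
        | cons p ps =>
            rw [show pvPj (c :: rest) = (pvPj rest).map (List.cons c) from by
                  simp [pvPj, hc],
                show pvSplitC (c :: rest) = (c :: p) :: ps from by simp [pvSplitC, hc, h],
                ih, h, List.map_map, List.length_cons]
            rw [show ((c :: p) :: ps).length - 1 = ps.length from by simp,
                show ps.length + 1 - 1 = ps.length from by simp]
            refine List.map_congr_left ?_
            intro j hj
            simp only [Function.comp, List.take_succ_cons]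
            cases hps : ps.take j with
            | nil => simp [PySem.Chars.join_singleton]
            | cons q qs =>
                rw [PySem.Chars.join_cons_cons, PySem.Chars.join_cons_cons]
                simp

-- join with a trailing "*" part
lemma pvJoin_star (l : List (List Char)) (h : l ≠ []) :
    PySem.Chars.join ['.'] (l ++ [['*']]) = PySem.Chars.join ['.'] l ++ ['.', '*'] := by
  induction l with
  | nil => exact absurd rfl h
  | cons a l' ih =>
      cases l' with
      | nil =>
          simp [PySem.Chars.join_cons_cons, PySem.Chars.join_singleton]
      | cons b l'' =>
          rw [List.cons_append, pvJoin_cons_of_ne_nil a ((b :: l'') ++ [['*']]) (by simp),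
            ih (by simp), pvJoin_cons_of_ne_nil a (b :: l'') (by simp)]
          simp

lemma pvAFor_eq (src : List String) (l : List String) :
    pvAFor src l = if l.any (fun e => src.contains e) then some true else none := by
  induction l with
  | nil => rfl
  | cons e rest ih =>
      simp only [pvAFor, List.any_cons, ih]
      by_cases h : e ∈ src <;> simp [h]

lemma pvBScan_eq (check : String) (l : List String) :
    pvBScan check l = if l.any (pvMatch check) then some true else none := by
  induction l with
  | nil => rfl
  | cons s rest ih =>
      simp only [pvBScan, List.any_cons, ih]
      by_cases h : pvMatch check s <;> simp [h]

lemma pvALoop_any (split : List String) (C : String → Bool) : ∀ k : Nat,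
    (pvALoop split k).any C
      = (List.range k).any (fun j => C (PySem.Str.join "." (split.take (j + 1) ++ ["*"]))) := by
  intro k
  induction k with
  | zero => rfl
  | succ k ih =>
      rw [List.range_succ]
      simp only [pvALoop, List.any_cons, List.any_append, List.any_cons, List.any_nil, ih,
        PySem.List.slice_to_natCast]
      cases (List.range k).any (fun j => C (PySem.Str.join "." (split.take (j + 1) ++ ["*"]))) <;>
        cases h : C (PySem.Str.join "." (split.take (k + 1) ++ ["*"])) <;> simp

-- A's pattern for index j, seen through toList
lemma pvPattern_toList (check s : String) (j : Nat) :
    s = PySem.Str.join "." (((pvSplitC check.toList).map String.ofList).take (j + 1) ++ ["*"])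
      ↔ s.toList
          = PySem.Chars.join ['.'] ((pvSplitC check.toList).take (j + 1)) ++ ['.', '*'] := by
  have htne : (pvSplitC check.toList).take (j + 1) ≠ [] := by
    have := pvSplitC_ne_nil check.toList
    cases h : pvSplitC check.toList with
    | nil => exact absurd h this
    | cons p ps => simp
  have hL : (PySem.Str.join "."
        (((pvSplitC check.toList).map String.ofList).take (j + 1) ++ ["*"])).toList
      = PySem.Chars.join ['.'] ((pvSplitC check.toList).take (j + 1)) ++ ['.', '*'] := by
    rw [PySem.Str.toList_join]
    rw [show (List.map String.toList
          (((pvSplitC check.toList).map String.ofList).take (j + 1) ++ ["*"]))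
        = (pvSplitC check.toList).take (j + 1) ++ [['*']] from by
      rw [← List.map_take, List.map_append, List.map_map]
      simp [Function.comp_def, String.toList_ofList]]
    exact pvJoin_star _ htne
  constructor
  · intro h; rw [h, hL]
  · intro h; exact String.toList_injective (by rw [hL, ← h])

-- Source B's third test, characterised: s ends in ".*" and its stem is a proper dotted prefix
lemma pvClause3 (check s : String) :
    (PySem.Str.endswith s ".*" &&
        PySem.Str.startswith check (PySem.Str.slice s none (some (-2)) ++ ".")) = true
      ↔ ∃ t, s.toList = t ++ ['.', '*'] ∧ t ++ ['.'] <+: check.toList := by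
  simp only [Bool.and_eq_true, PySem.Str.endswith_eq, PySem.Str.startswith_eq,
    PySem.Chars.endswith_iff, PySem.Chars.startswith_iff, String.toList_append,
    PySem.Str.toList_slice, PySem.Chars.slice_eq_listSlice,
    show (".*" : String).toList = ['.', '*'] from rfl,
    show ("." : String).toList = ['.'] from rfl]
  constructor
  · rintro ⟨⟨t, ht⟩, hpre⟩
    refine ⟨t, ht.symm, ?_⟩
    rwa [← ht, show PySem.List.slice (t ++ ['.', '*']) none (some (-2)) = t from by
      simp [PySem.List.slice]] at hpre
  · rintro ⟨t, ht, hpre⟩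
    refine ⟨⟨t, ht.symm⟩, ?_⟩
    rwa [ht, show PySem.List.slice (t ++ ['.', '*']) none (some (-2)) = t from by
      simp [PySem.List.slice]]

-- the pointwise fact: one src element matches Source B's test iff it equals one of A's patterns
lemma pvMatch_iff (check s : String) :
    pvMatch check s = true ↔
      (s = "*" ∨ s = check ∨
        ∃ j < (pvSplitC check.toList).length - 1,
          s = PySem.Str.join "."
            (((pvSplitC check.toList).map String.ofList).take (j + 1) ++ ["*"])) := by
  unfold pvMatch
  simp only [Bool.or_eq_true, beq_iff_eq, pvClause3]
  rw [or_assoc]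
  refine or_congr Iff.rfl (or_congr Iff.rfl ?_)
  constructor
  · rintro ⟨t, hst, hpre⟩
    have hmem : t ∈ pvPj check.toList := (pvPj_mem check.toList t).2 hpre
    rw [pvPj_eq] at hmem
    obtain ⟨j, hj, rfl⟩ := List.mem_map.1 hmem
    rw [List.mem_range] at hj
    exact ⟨j, hj, (pvPattern_toList check s j).2 hst⟩
  · rintro ⟨j, hj, hs⟩
    refine ⟨PySem.Chars.join ['.'] ((pvSplitC check.toList).take (j + 1)),
      (pvPattern_toList check s j).1 hs, ?_⟩
    refine (pvPj_mem check.toList _).1 ?_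
    rw [pvPj_eq]
    exact List.mem_map.2 ⟨j, List.mem_range.2 hj, rfl⟩

-- ===== VERDICT (by name: the statement is the Claim_ definition above) =====
theorem element_in_dot_star_list_spec : Claim_equal_element_in_dot_star_list := by
  intro src check _
  show element_in_dot_star_list src check = element_in_dot_star_list_alt src check
  unfold element_in_dot_star_list element_in_dot_star_list_alt
  rw [pvSplit?_eq]
  rw [pvBScan_eq, pvAFor_eq]
  simp only [List.any_append, List.any_cons, List.any_nil, Bool.or_false,
    pvALoop_any, List.length_map]
  congr 1
  refine propext ?_
  simp only [Bool.or_eq_true, List.any_eq_true, List.contains_eq_mem,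
    decide_eq_true_eq, List.mem_range]
  constructor
  · rintro ((h | h) | ⟨j, hj, hs⟩)
    · exact ⟨"*", h, by simp [pvMatch]⟩
    · exact ⟨check, h, by simp [pvMatch]⟩
    · exact ⟨_, hs, (pvMatch_iff check _).2 (Or.inr (Or.inr ⟨j, hj, rfl⟩))⟩
  · rintro ⟨s, hs, hm⟩
    rcases (pvMatch_iff check s).1 hm with h | h | ⟨j, hj, he⟩
    · exact Or.inl (Or.inl (h ▸ hs))
    · exact Or.inl (Or.inr (h ▸ hs))
    · exact Or.inr ⟨j, hj, he ▸ hs⟩
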